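-- pv_equiv track=rewrite | github.com/hannahsky86/find_available_times | FindAvailableTimes.py | unavailable_time_and_duration
-- ===== SOURCE A (Python) =====
-- from collections import defaultdict
--
-- def unavailable_time_and_duration(busy_intervals):
--     """Create a list of busy times and duration of busy time"""
--
--     busy_times = []
--     busy_dict = defaultdict(list)
--
--     for start, end in busy_intervals:
--
--         duration = end - start
--         busy_times.append((start, duration))
--         busy_dict[start].append(duration)
--
--     busy_time_and_duration_list = []
--     for key, value in busy_dict.items():
--         busy_time_and_duration_list.append([key, key+max(value)])
--
--     return busy_time_and_duration_list
-- ===== SOURCE B (Python) =====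
-- def unavailable_time_and_duration(busy_intervals):
--     """Create a list of busy times and duration of busy time"""
--     starts = []
--     for start, _ in busy_intervals:
--         if start not in starts:
--             starts.append(start)
--     return [[s, s + max(end - start for start, end in busy_intervals if start == s)]
--             for s in starts]
-- ===== Notes on version B (the rewrite author's own statement) =====
-- stated objective: alternative
-- what changed: No dict and no grouping: first collect the distinct starts in first-appearance order, then for each start rescan the whole input with a nested max over the durations of the intervals that share that start (O(n*k) nested scans instead of A's O(n) dict grouping).
import Mathlib
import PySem

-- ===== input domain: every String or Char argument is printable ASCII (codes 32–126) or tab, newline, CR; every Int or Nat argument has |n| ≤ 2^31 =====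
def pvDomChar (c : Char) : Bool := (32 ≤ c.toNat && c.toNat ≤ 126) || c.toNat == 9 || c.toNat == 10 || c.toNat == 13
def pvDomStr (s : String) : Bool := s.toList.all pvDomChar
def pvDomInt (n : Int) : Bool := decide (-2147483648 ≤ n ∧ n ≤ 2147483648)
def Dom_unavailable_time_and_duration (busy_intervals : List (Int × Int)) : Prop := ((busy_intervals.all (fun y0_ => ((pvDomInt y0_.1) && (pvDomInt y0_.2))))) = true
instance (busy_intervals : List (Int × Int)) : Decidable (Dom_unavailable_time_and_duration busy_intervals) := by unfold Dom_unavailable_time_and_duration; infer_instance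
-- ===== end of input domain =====

-- B drops A's dict entirely: it first collects the distinct starts in first-appearance order,
-- then for each start rescans the input with a nested max over matching durations (objective: alternative).

-- ===== PORT A =====
-- the loop keeps the pair (busy_times, busy_dict); busy_times is built but never read, as in A
def unavailable_time_and_duration (busy_intervals : List (Int × Int)) : List (List Int) :=
  let st := busy_intervals.foldl
    (fun (acc : List (Int × Int) × PySem.Dict Int (List Int)) p =>
      let duration := p.2 - p.1
      (acc.1 ++ [(p.1, duration)], acc.2.modify p.1 [] (· ++ [duration])))
    ([], PySem.Dict.empty)
  -- max(value): every bucket of busy_dict is nonempty by construction, so .getD 0 is exact here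
  st.2.items.foldl
    (fun acc kv => acc ++ [[kv.1, kv.1 + (PySem.List.max? kv.2 (fun x => x)).getD 0]]) []

-- ===== PORT B =====
def unavailable_time_and_duration_alt (busy_intervals : List (Int × Int)) : List (List Int) :=
  let starts := busy_intervals.foldl
    (fun (acc : List Int) p => if acc.contains p.1 then acc else acc ++ [p.1]) []
  -- max(generator): the generator is nonempty because s came from busy_intervals, so .getD 0 is exact
  starts.map (fun s =>
    [s, s + (PySem.List.max?
        ((busy_intervals.filter (fun p => p.1 == s)).map (fun p => p.2 - p.1))
        (fun x => x)).getD 0])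

-- ===== PRECONDITION & SPEC =====
def Spec_unavailable_time_and_duration (busy_intervals : List (Int × Int)) (out : List (List Int)) : Prop := out = unavailable_time_and_duration_alt busy_intervals
instance (busy_intervals : List (Int × Int)) (out : List (List Int)) : Decidable (Spec_unavailable_time_and_duration busy_intervals out) := by unfold Spec_unavailable_time_and_duration; infer_instance

-- ===== CLAIM (what is proved, stated in full; the proofs are below) =====
def Claim_equal_unavailable_time_and_duration : Prop := ∀ (busy_intervals : List (Int × Int)), Dom_unavailable_time_and_duration busy_intervals → Spec_unavailable_time_and_duration busy_intervals (unavailable_time_and_duration busy_intervals)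

-- ===== LEMMAS AND PROOFS =====

-- A's bucket for key k is exactly the durations of the intervals starting at k
def pvDictA (l : List (Int × Int)) : PySem.Dict Int (List Int) :=
  l.foldl (fun d p => d.modify p.1 [] (· ++ [p.2 - p.1])) PySem.Dict.empty

lemma pvA_getD (l : List (Int × Int)) (k : Int) :
    (pvDictA l).getD k [] = (l.filter (fun p => p.1 == k)).map (fun p => p.2 - p.1) := by
  unfold pvDictA
  have h := PySem.Dict.getD_foldl_modify_append
    (l := l.map (fun p => (p.1, p.2 - p.1))) (d := PySem.Dict.empty) (c := k)
  rw [List.foldl_map] at h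
  simp only [h, PySem.Dict.getD_empty, List.nil_append]
  rw [List.filter_map, List.map_map]
  rfl

lemma pvA_keys (l : List (Int × Int)) : (pvDictA l).keys = PySem.Set.ofList (l.map (·.1)) := by
  unfold pvDictA
  rw [PySem.Dict.keys_foldl_modify_key]
  simp [PySem.Set.update_nil_left]

lemma pvA_nodup (l : List (Int × Int)) : (pvDictA l).keys.Nodup := by
  rw [pvA_keys]; exact PySem.Set.nodup_ofList _

-- the first loop of A: the dict component is pvDictA
lemma pvA_loop (l : List (Int × Int)) :
    (l.foldl
      (fun (acc : List (Int × Int) × PySem.Dict Int (List Int)) p =>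
        (acc.1 ++ [(p.1, p.2 - p.1)], acc.2.modify p.1 [] (· ++ [p.2 - p.1])))
      ([], PySem.Dict.empty)).2 = pvDictA l := by
  rw [PySem.List.foldl_prod_mk
    (f := fun acc (p : Int × Int) => acc ++ [(p.1, p.2 - p.1)])
    (g := fun d (p : Int × Int) => PySem.Dict.modify d p.1 [] (· ++ [p.2 - p.1]))]
  rfl

-- B's dedup loop is set(…) in first-appearance order
lemma pvB_starts (l : List (Int × Int)) :
    l.foldl (fun (acc : List Int) p => if acc.contains p.1 then acc else acc ++ [p.1]) []
      = PySem.Set.ofList (l.map (·.1)) := by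
  rw [PySem.Set.ofList_eq_foldl, List.foldl_map]
  rfl

-- ===== VERDICT (by name: the statement is the Claim_ definition above) =====
theorem unavailable_time_and_duration_spec : Claim_equal_unavailable_time_and_duration := by
  intro l _
  show unavailable_time_and_duration l = unavailable_time_and_duration_alt l
  unfold unavailable_time_and_duration unavailable_time_and_duration_alt
  have hA2 := pvA_loop l
  simp only [] at hA2 ⊢
  rw [hA2, pvB_starts]
  rw [PySem.List.foldl_append_singleton_eq_map, List.nil_append]
  rw [PySem.Dict.items_eq_map_keys (pvDictA l) (pvA_nodup l) []]
  rw [pvA_keys, List.map_map]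
  apply List.map_congr_left
  intro k _
  simp only [Function.comp, pvA_getD]
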